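-- pv_equiv track=rewrite | github.com/AshlynPowell/h-fibroin-visual | h-fibroin_visual.py | indexDictionary
-- ===== SOURCE A (Python) =====
-- def getMax(num, counts):
-- 	keys = []
-- 	values = []
-- 	while len(keys) < num:
-- 		max_val = 0
-- 		max_key = ""
-- 		for key, value in counts.items():
-- 			if value > max_val and key not in keys:
-- 				max_key = key
-- 				max_val = value
-- 		keys.append(max_key)
-- 		values.append(max_val)
-- 	return keys
--
-- def indexDictionary(num, counts, a_patterns1, a_patterns2):
-- 	max_motifs = getMax(num, counts)
-- 	index_dicts = []
-- 	for i, motif in enumerate(max_motifs):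
-- 		index_dict = {}
-- 		motif_num = i + 1
-- 		copy_num = 1
-- 		allele_num = 0
-- 		for a_patterns in [a_patterns1, a_patterns2]:
-- 			for j, pattern in enumerate(a_patterns):
-- 				if pattern == motif:
-- 					header = f">rep{allele_num+1}_{copy_num}"
-- 					copy_num += 1
-- 					index = [allele_num, j]
-- 					index_dict[header] = index
-- 			allele_num += 1
-- 		index_dicts.append(index_dict)
-- 	return index_dicts
-- ===== SOURCE B (Python) =====
-- def getMax(num, counts):
-- 	keys = []
-- 	values = []
-- 	while len(keys) < num:
-- 		max_val = 0
-- 		max_key = ""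
-- 		for key, value in counts.items():
-- 			if value > max_val and key not in keys:
-- 				max_key = key
-- 				max_val = value
-- 		keys.append(max_key)
-- 		values.append(max_val)
-- 	return keys
--
-- def indexDictionary(num, counts, a_patterns1, a_patterns2):
-- 	max_motifs = getMax(num, counts)
-- 	tagged = [(pattern, (allele_num, j))
-- 		for allele_num, a_patterns in enumerate([a_patterns1, a_patterns2])
-- 		for j, pattern in enumerate(a_patterns)]
-- 	occ = {}
-- 	for pattern, pos in tagged:
-- 		occ.setdefault(pattern, []).append(pos)
-- 	index_dicts = []
-- 	for motif in max_motifs: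
-- 		index_dict = {}
-- 		copy_num = 1
-- 		for allele_num, j in occ.get(motif, []):
-- 			index_dict[f">rep{allele_num+1}_{copy_num}"] = [allele_num, j]
-- 			copy_num += 1
-- 		index_dicts.append(index_dict)
-- 	return index_dicts
-- ===== Notes on version B (the rewrite author's own statement) =====
-- stated objective: alternative
-- what changed: B keeps getMax for the ordered top-num motifs but replaces A's rescan of both pattern lists for every motif with one pass that builds a pattern->occurrence-list dict, from which each motif's index dict is read off directly.
import Mathlib
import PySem

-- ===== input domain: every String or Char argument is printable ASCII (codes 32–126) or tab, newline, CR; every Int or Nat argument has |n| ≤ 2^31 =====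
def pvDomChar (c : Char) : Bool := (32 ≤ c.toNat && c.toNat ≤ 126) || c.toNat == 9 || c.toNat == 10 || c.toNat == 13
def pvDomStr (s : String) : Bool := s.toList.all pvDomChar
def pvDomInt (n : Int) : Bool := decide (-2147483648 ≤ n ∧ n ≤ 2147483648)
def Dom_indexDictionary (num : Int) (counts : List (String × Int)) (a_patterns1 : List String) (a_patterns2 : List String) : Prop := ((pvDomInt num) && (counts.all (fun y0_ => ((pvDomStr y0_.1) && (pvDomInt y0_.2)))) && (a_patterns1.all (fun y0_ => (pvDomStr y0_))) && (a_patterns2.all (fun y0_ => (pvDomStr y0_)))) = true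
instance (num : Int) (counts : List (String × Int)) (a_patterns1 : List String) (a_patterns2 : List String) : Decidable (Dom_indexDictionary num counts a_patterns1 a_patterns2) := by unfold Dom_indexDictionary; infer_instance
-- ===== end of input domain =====

-- B keeps the module's getMax helper (ordered top-num motifs) but replaces A's rescan of both
-- pattern lists for every motif with one pass building a pattern→occurrence-list dict.

-- ===== PORT A =====
-- inner for-loop of getMax: scan counts.items() keeping the running max (key, value)
def getMaxScan (keys : List String) (counts : List (String × Int)) : String × Int :=
  counts.foldl (fun acc kv =>
    if kv.2 > acc.2 ∧ keys.contains kv.1 = false then kv else acc) ("", 0)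

-- while len(keys) < num: keys starts empty and grows by one per pass, so the loop runs num.toNat times
def getMaxLoop (counts : List (String × Int)) : Nat → List String → List Int → List String
  | 0, keys, _values => keys
  | fuel+1, keys, values =>
      let mx := getMaxScan keys counts
      getMaxLoop counts fuel (keys ++ [mx.1]) (values ++ [mx.2])

def getMax (num : Int) (counts : List (String × Int)) : List String :=
  getMaxLoop counts num.toNat [] []

-- f">rep{allele_num+1}_{copy_num}"
def pvHeader (allele copy : Int) : String :=
  ">rep" ++ PySem.Int.toStr (allele + 1) ++ "_" ++ PySem.Int.toStr copy

def indexDictionary (num : Int) (counts : List (String × Int)) (a_patterns1 : List String) (a_patterns2 : List String) : List (List (String × List Int)) :=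
  let max_motifs := getMax num counts
  max_motifs.foldl (fun index_dicts motif =>
    -- state: (index_dict, copy_num, allele_num)
    let st := [a_patterns1, a_patterns2].foldl
      (fun (st : PySem.Dict String (List Int) × Int × Int) a_patterns =>
        let st2 := (PySem.List.enumerate a_patterns 0).foldl
          (fun (st : PySem.Dict String (List Int) × Int × Int) jp =>
            if jp.2 == motif then
              (st.1.insert (pvHeader st.2.2 st.2.1) [st.2.2, jp.1], st.2.1 + 1, st.2.2)
            else st) st
        (st2.1, st2.2.1, st2.2.2 + 1))
      (PySem.Dict.empty, 1, 0)
    index_dicts ++ [st.1.items]) []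

-- ===== PORT B =====
-- Source B re-uses the module's getMax unchanged, so its port shares the getMax helper above
def indexDictionary_alt (num : Int) (counts : List (String × Int)) (a_patterns1 : List String) (a_patterns2 : List String) : List (List (String × List Int)) :=
  let max_motifs := getMax num counts
  -- the tagged comprehension: [(pattern, (allele_num, j)) …]
  let tagged : List (String × Int × Int) :=
    (PySem.List.enumerate [a_patterns1, a_patterns2] 0).flatMap
      (fun ap => (PySem.List.enumerate ap.2 0).map (fun jp => (jp.2, ap.1, jp.1)))
  -- occ.setdefault(pattern, []).append(pos)
  let occ : PySem.Dict String (List (Int × Int)) :=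
    tagged.foldl (fun d p => d.modify p.1 [] (· ++ [p.2])) PySem.Dict.empty
  max_motifs.foldl (fun index_dicts motif =>
    -- state: (index_dict, copy_num)
    let st := (occ.getD motif []).foldl
      (fun (st : PySem.Dict String (List Int) × Int) aj =>
        (st.1.insert (pvHeader aj.1 st.2) [aj.1, aj.2], st.2 + 1))
      (PySem.Dict.empty, 1)
    index_dicts ++ [st.1.items]) []

-- ===== PRECONDITION & SPEC =====
def Spec_indexDictionary (num : Int) (counts : List (String × Int)) (a_patterns1 : List String) (a_patterns2 : List String) (out : List (List (String × List Int))) : Prop := out = indexDictionary_alt num counts a_patterns1 a_patterns2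
instance (num : Int) (counts : List (String × Int)) (a_patterns1 : List String) (a_patterns2 : List String) (out : List (List (String × List Int))) : Decidable (Spec_indexDictionary num counts a_patterns1 a_patterns2 out) := by unfold Spec_indexDictionary; infer_instance

-- ===== CLAIM (what is proved, stated in full; the proofs are below) =====
def Claim_equal_indexDictionary : Prop := ∀ (num : Int) (counts : List (String × Int)) (a_patterns1 : List String) (a_patterns2 : List String), Dom_indexDictionary num counts a_patterns1 a_patterns2 → Spec_indexDictionary num counts a_patterns1 a_patterns2 (indexDictionary num counts a_patterns1 a_patterns2)

-- ===== LEMMAS AND PROOFS =====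

-- B's per-occurrence insertion step
def pvStep (st : PySem.Dict String (List Int) × Int) (aj : Int × Int) : PySem.Dict String (List Int) × Int :=
  (st.1.insert (pvHeader aj.1 st.2) [aj.1, aj.2], st.2 + 1)

-- the occurrences of motif in ps, tagged with allele number a
def pvOccs (ps : List String) (motif : String) (a : Int) : List (Int × Int) :=
  ((PySem.List.enumerate ps 0).filter (fun jp => jp.2 == motif)).map (fun jp => (a, jp.1))

-- A's inner loop over one enumerated pattern list = pvStep folded over that list's occurrences
lemma innerA_eq (motif : String) (a : Int) :
    ∀ (L : List (Int × String)) (d : PySem.Dict String (List Int)) (c : Int),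
    L.foldl (fun (st : PySem.Dict String (List Int) × Int × Int) jp =>
        if jp.2 == motif then
          (st.1.insert (pvHeader st.2.2 st.2.1) [st.2.2, jp.1], st.2.1 + 1, st.2.2)
        else st) (d, c, a)
      = (let r := ((L.filter (fun jp => jp.2 == motif)).map (fun jp => ((a, jp.1) : Int × Int))).foldl pvStep (d, c)
         (r.1, r.2, a)) := by
  intro L
  induction L with
  | nil => intro d c; simp
  | cons jp L ih =>
    intro d c
    by_cases h : jp.2 == motif
    · simp only [List.foldl_cons, List.filter_cons, h, if_true, List.map_cons]
      exact ih _ _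
    · simp only [List.foldl_cons, List.filter_cons, h, if_false, Bool.false_eq_true]
      exact ih _ _

-- B's occurrence dict lookup = the two filtered occurrence lists, in A's traversal order
lemma occ_getD (a1 a2 : List String) (motif : String) :
    (((PySem.List.enumerate [a1, a2] 0).flatMap
        (fun ap => (PySem.List.enumerate ap.2 0).map (fun jp => ((jp.2, ap.1, jp.1) : String × Int × Int)))).foldl
      (fun d p => d.modify p.1 [] (· ++ [p.2])) PySem.Dict.empty).getD motif []
    = pvOccs a1 motif 0 ++ pvOccs a2 motif 1 := by
  rw [PySem.Dict.getD_foldl_modify_append]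
  simp [PySem.List.enumerate_cons, PySem.List.enumerate_nil, List.flatMap, List.filter_append,
        List.filter_map, List.map_map, pvOccs, Function.comp_def]

-- ===== VERDICT (by name: the statement is the Claim_ definition above) =====
theorem indexDictionary_spec : Claim_equal_indexDictionary := by
  intro num counts a1 a2 _
  unfold Spec_indexDictionary indexDictionary indexDictionary_alt
  dsimp only
  rw [PySem.List.foldl_append_singleton_eq_map, PySem.List.foldl_append_singleton_eq_map]
  apply List.map_congr_left
  intro motif _
  rw [occ_getD]
  simp only [List.foldl_cons, List.foldl_nil]
  rw [innerA_eq motif 0 (PySem.List.enumerate a1 0) PySem.Dict.empty 1]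
  dsimp only
  rw [innerA_eq motif (0+1)]
  dsimp only
  rw [show ((0:Int)+1) = 1 by norm_num]
  rw [List.foldl_append]
  rfl
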